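-- pv_equiv track=rewrite | github.com/talia158/ISTS | ists-backend/main.py | numbers_to_bitmaps
-- ===== SOURCE A (Python) =====
-- from typing import Any, Dict, List, Set, Tuple
--
-- def numbers_to_bitmaps(numbers: List[int]) -> List[int]:
--     """Convert a list of non‑negative ints to a variable‑length 32‑bit bitmap list.
--
--     Returned format: ``[block_count, block0, block1, ...]`` where each *block*
--     is a 32‑bit bitmap representing presence within that slice.
--     """
--     from collections import defaultdict
--
--     # If there are no numbers, keep the original behavior of returning [0].
--     if not numbers:
--         return [0]
--
--     bitmaps_dict = defaultdict(int)
--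
--     # Fill blocks based on the 32-bit block index (num // 32)
--     for num in numbers:
--         idx = num // 32
--         bit = num % 32
--         bitmaps_dict[idx] |= (1 << bit)
--
--     # Instead of only storing blocks that appear, fill up every block
--     # from 0 up to the maximum block index encountered.
--     max_idx = max(bitmaps_dict.keys())
--
--     bitmaps = []
--     for i in range(max_idx + 1):
--         bitmaps.append(bitmaps_dict[i])  # defaults to 0 if not present
--
--     # Prepend the number of blocks
--     return [len(bitmaps)] + bitmaps
-- ===== SOURCE B (Python) =====
-- def numbers_to_bitmaps(numbers):
--     # Sort the non-negative inputs, then build the block list sequentially: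
--     # block indices arrive in non-decreasing order, so each bit lands in the
--     # last block and gaps are filled by appending zero blocks.
--     blocks = []
--     for n in sorted(x for x in numbers if x >= 0):
--         while len(blocks) <= n // 32:
--             blocks.append(0)
--         blocks[-1] |= 1 << (n % 32)
--     if not blocks:
--         return [0]
--     return [len(blocks)] + blocks
-- ===== Notes on version B (the rewrite author's own statement) =====
-- stated objective: alternative
-- what changed: Replaces A's defaultdict accumulation plus max-of-keys and range reconstruction with sort-then-scan: the non-negative inputs are sorted, so blocks are emitted strictly left-to-right by appending (zero blocks for gaps, bits ORed into the last block), with no dictionary, no random access and no max computation.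
import Mathlib
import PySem

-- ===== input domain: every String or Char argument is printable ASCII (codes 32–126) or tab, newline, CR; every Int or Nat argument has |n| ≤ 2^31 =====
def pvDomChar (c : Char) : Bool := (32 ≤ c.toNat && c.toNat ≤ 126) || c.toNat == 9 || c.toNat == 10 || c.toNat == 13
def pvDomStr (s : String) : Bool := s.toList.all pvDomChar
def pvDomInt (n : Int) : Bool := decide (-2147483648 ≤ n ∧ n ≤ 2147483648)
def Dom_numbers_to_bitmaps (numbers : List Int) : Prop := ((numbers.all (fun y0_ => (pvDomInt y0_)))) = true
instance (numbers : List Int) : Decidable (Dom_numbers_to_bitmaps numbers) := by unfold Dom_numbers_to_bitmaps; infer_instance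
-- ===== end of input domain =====

-- B replaces A's defaultdict + max-of-keys + range reconstruction with sort-then-scan:
-- the non-negative inputs are sorted and the block list is emitted left-to-right by
-- appending (zero blocks for gaps, bits ORed into the last block); alternative, same order of cost.

-- ===== PORT A =====
-- loop body of A's first for-loop: bitmaps_dict[idx] |= (1 << bit)
def stepA (d : PySem.Dict Int Int) (num : Int) : PySem.Dict Int Int :=
  d.modify (PySem.Int.floordiv num 32) 0
    (fun v => PySem.Int.bor v ((1 : Int) <<< (PySem.Int.mod num 32).toNat))

-- transliteration of A: guard, defaultdict fill, max over keys, range append loop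
def numbers_to_bitmaps (numbers : List Int) : List Int :=
  if numbers = [] then [0]
  else
    let d : PySem.Dict Int Int := numbers.foldl stepA PySem.Dict.empty
    let maxIdx := (PySem.List.max? d.keys (fun x => x)).getD 0
    let bitmaps := (PySem.List.pyRange 0 (maxIdx + 1) 1).foldl (fun acc i => acc ++ [d.getD i 0]) []
    ((bitmaps.length : Int)) :: bitmaps

-- ===== PORT B =====
-- B's inner while-loop: while len(blocks) <= n // 32: blocks.append(0)
def padB (blocks : List Int) (idx : Int) : List Int :=
  if (blocks.length : Int) ≤ idx then padB (blocks ++ [(0 : Int)]) idx else blocks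
termination_by (idx + 1 - blocks.length).toNat
decreasing_by simp only [List.length_append, List.length_cons, List.length_nil]; omega

-- B's for-loop body: pad, then blocks[-1] |= 1 << (n % 32)
def stepB (blocks : List Int) (n : Int) : List Int :=
  let b := padB blocks (PySem.Int.floordiv n 32)
  b.set (b.length - 1)
    (PySem.Int.bor (b.getD (b.length - 1) 0) ((1 : Int) <<< (PySem.Int.mod n 32).toNat))

-- transliteration of B: sort the non-negative inputs, scan, guard on empty result
def numbers_to_bitmaps_alt (numbers : List Int) : List Int :=
  let blocks :=
    (PySem.List.sorted (numbers.filter (fun x => decide (0 ≤ x))) (fun x => x) false).foldl stepB []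
  if blocks = [] then [0] else ((blocks.length : Int)) :: blocks

-- ===== PRECONDITION & SPEC =====
def Spec_numbers_to_bitmaps (numbers : List Int) (out : List Int) : Prop := out = numbers_to_bitmaps_alt numbers
instance (numbers : List Int) (out : List Int) : Decidable (Spec_numbers_to_bitmaps numbers out) := by unfold Spec_numbers_to_bitmaps; infer_instance

-- ===== CLAIM (what is proved, stated in full; the proofs are below) =====
def Claim_equal_numbers_to_bitmaps : Prop := ∀ (numbers : List Int), Dom_numbers_to_bitmaps numbers → Spec_numbers_to_bitmaps numbers (numbers_to_bitmaps numbers)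

-- ===== LEMMAS AND PROOFS =====

-- the bitmap of block i accumulated over a list, with a Nat accumulator
def natStep (i : Int) (a : Nat) (n : Int) : Nat :=
  if PySem.Int.floordiv n 32 = i then a ||| (1 <<< (PySem.Int.mod n 32).toNat) else a

def bitOf (l : List Int) (i : Int) : Int := ((l.foldl (natStep i) 0 : Nat) : Int)

def maxIdx (l : List Int) : Int := l.foldl (fun m x => max m (PySem.Int.floordiv x 32)) (-1)

def mkBlocks (l : List Int) : List Int := (PySem.List.pyRange 0 (maxIdx l + 1) 1).map (bitOf l)

lemma bor_shift (a k : Nat) :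
    PySem.Int.bor (a : Int) ((1 : Int) <<< k) = ((a ||| 1 <<< k : Nat) : Int) := by
  rw [show (1 : Int) <<< k = (((1 <<< k : Nat)) : Int) by simp [Int.shiftLeft_eq, Nat.shiftLeft_eq],
      PySem.Int.bor_natCast]

lemma fdiv_neg {x : Int} (h : x < 0) : PySem.Int.floordiv x 32 < 0 := by
  rw [PySem.Int.floordiv_lt_iff_lt_mul (by norm_num)]; omega

lemma fdiv_nonneg {x : Int} (h : 0 ≤ x) : 0 ≤ PySem.Int.floordiv x 32 := by
  rw [PySem.Int.le_floordiv_iff_mul_le (by norm_num)]; omega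

lemma fdiv_mono {x y : Int} (h : x ≤ y) :
    PySem.Int.floordiv x 32 ≤ PySem.Int.floordiv y 32 := by
  rw [PySem.Int.floordiv_eq_ediv_of_pos (by norm_num),
      PySem.Int.floordiv_eq_ediv_of_pos (by norm_num)]
  exact Int.ediv_le_ediv (by norm_num) h

-- A's dict lookup at i is the Nat fold
lemma dictA_getD (l : List Int) (d : PySem.Dict Int Int) (i : Int) (a : Nat)
    (h : d.getD i 0 = (a : Int)) :
    (l.foldl stepA d).getD i 0 = ((l.foldl (natStep i) a : Nat) : Int) := by
  induction l generalizing d a with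
  | nil => exact h
  | cons n t ih =>
    simp only [List.foldl_cons]
    apply ih
    unfold stepA natStep
    rw [PySem.Dict.getD_modify]
    by_cases hc : PySem.Int.floordiv n 32 = i
    · rw [if_pos hc.symm, if_pos hc, hc, h, bor_shift]
    · rw [if_neg (fun hh => hc hh.symm), if_neg hc, h]

lemma natFold_const (l : List Int) (i : Int) (a : Nat)
    (h : ∀ x ∈ l, PySem.Int.floordiv x 32 ≠ i) : l.foldl (natStep i) a = a := by
  induction l generalizing a with
  | nil => rfl
  | cons n t ih =>
    simp only [List.foldl_cons]
    rw [show natStep i a n = a by unfold natStep; rw [if_neg (h n (by simp))]]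
    exact ih a (fun x hx => h x (by simp [hx]))

lemma natFold_filter (l : List Int) (i : Int) (a : Nat) (hi : 0 ≤ i) :
    l.foldl (natStep i) a = (l.filter (fun x => decide (0 ≤ x))).foldl (natStep i) a := by
  induction l generalizing a with
  | nil => rfl
  | cons n t ih =>
    by_cases hn : 0 ≤ n
    · simp only [List.foldl_cons, List.filter_cons, hn, decide_true, if_true]
      exact ih _
    · have : natStep i a n = a := by
        unfold natStep
        rw [if_neg]
        intro hc
        have := fdiv_neg (x := n) (by omega)
        omega
      simp only [List.foldl_cons, List.filter_cons, hn, decide_false, this]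
      exact ih _

lemma natFold_perm {s l : List Int} (h : s.Perm l) (i : Int) (a : Nat) :
    s.foldl (natStep i) a = l.foldl (natStep i) a := by
  have rc : RightCommutative (natStep i) := by
    refine ⟨fun b a1 a2 => ?_⟩
    unfold natStep
    split_ifs <;> try rfl
    rw [Nat.lor_assoc, Nat.lor_comm (1 <<< (PySem.Int.mod a1 32).toNat), ← Nat.lor_assoc]
  exact List.Perm.foldl_eq h a

lemma maxIdx_perm {s l : List Int} (h : s.Perm l) : maxIdx s = maxIdx l := by
  have rc : RightCommutative (fun (m : Int) x => max m (PySem.Int.floordiv x 32)) := by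
    refine ⟨fun b a1 a2 => ?_⟩
    rw [max_assoc, max_comm (PySem.Int.floordiv a1 32), ← max_assoc]
  exact List.Perm.foldl_eq h (-1)

lemma maxIdx_bounds (l : List Int) :
    -1 ≤ maxIdx l ∧ ∀ x ∈ l, PySem.Int.floordiv x 32 ≤ maxIdx l :=
  PySem.List.le_foldl_max_int l (fun x => PySem.Int.floordiv x 32) (-1)

lemma maxIdx_mem (l : List Int) :
    maxIdx l = -1 ∨ maxIdx l ∈ l.map (fun x => PySem.Int.floordiv x 32) := by
  have he : maxIdx l = (l.map (fun x => PySem.Int.floordiv x 32)).foldl max (-1) := by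
    rw [List.foldl_map]; rfl
  rw [he]
  exact PySem.List.foldl_max_mem _ _

lemma maxIdx_append_singleton (l : List Int) (n : Int) :
    maxIdx (l ++ [n]) = max (maxIdx l) (PySem.Int.floordiv n 32) := by
  unfold maxIdx
  rw [List.foldl_append]
  rfl

lemma length_mkBlocks (l : List Int) : (mkBlocks l).length = (maxIdx l + 1).toNat := by
  unfold mkBlocks
  rw [List.length_map, PySem.List.length_pyRange_one]
  omega

lemma padB_eq (blocks : List Int) (idx : Int) :
    padB blocks idx = blocks ++ List.replicate (idx + 1 - blocks.length).toNat 0 := by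
  fun_induction padB blocks idx with
  | case1 blocks h ih =>
    rw [ih]
    have hk : (idx + 1 - ((blocks ++ [(0:Int)]).length : Int)).toNat + 1
        = (idx + 1 - (blocks.length : Int)).toNat := by
      simp only [List.length_append, List.length_cons, List.length_nil]
      push_cast
      omega
    rw [List.append_assoc]
    congr 1
    rw [List.singleton_append, ← List.replicate_succ, hk]
  | case2 blocks h =>
    have : (idx + 1 - (blocks.length : Int)).toNat = 0 := by omega
    rw [this]
    simp

lemma bitOf_append_singleton (done : List Int) (n : Int) (i : Int) :
    bitOf (done ++ [n]) i = ((natStep i (done.foldl (natStep i) 0) n : Nat) : Int) := by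
  unfold bitOf
  rw [List.foldl_append]
  rfl

lemma bitOf_zero_of_gt (done : List Int) (i : Int) (h : maxIdx done < i) : bitOf done i = 0 := by
  unfold bitOf
  rw [natFold_const done i 0]
  · rfl
  · intro x hx hc
    have := (maxIdx_bounds done).2 x hx
    omega

-- the key step: one element of the sorted list advances the canonical block list
lemma stepB_mkBlocks (done : List Int) (n : Int) (hn : 0 ≤ n)
    (hle : ∀ x ∈ done, x ≤ n) :
    stepB (mkBlocks done) n = mkBlocks (done ++ [n]) := by
  set j := PySem.Int.floordiv n 32 with hjdef
  have hj : 0 ≤ j := fdiv_nonneg hn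
  have hmax : maxIdx done ≤ j := by
    rcases maxIdx_mem done with h | h
    · omega
    · rcases List.mem_map.mp h with ⟨x, hx, hfx⟩
      rw [← hfx]
      exact fdiv_mono (hle x hx)
  have hMr : maxIdx (done ++ [n]) = j := by
    rw [maxIdx_append_singleton, ← hjdef, max_eq_right hmax]
  -- the padded list is the range map of bitOf done up to j
  have hb0 := (maxIdx_bounds done).1
  have hpad : padB (mkBlocks done) j = (PySem.List.pyRange 0 (j + 1) 1).map (bitOf done) := by
    rw [padB_eq,
        PySem.List.pyRange_one_append 0 (maxIdx done + 1) (j + 1) (by omega) (by omega),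
        List.map_append]
    congr 1
    have hzero : ∀ i ∈ PySem.List.pyRange (maxIdx done + 1) (j + 1) 1,
        bitOf done i = (fun _ => (0 : Int)) i := by
      intro i hi
      have := PySem.List.mem_pyRange_one.mp hi
      exact bitOf_zero_of_gt done i (by omega)
    rw [List.map_congr_left hzero, List.map_const', PySem.List.length_pyRange_one, length_mkBlocks]
    congr 1
    omega
  simp only [stepB]
  rw [← hjdef, hpad]
  have hlen : ((PySem.List.pyRange 0 (j + 1) 1).map (bitOf done)).length = j.toNat + 1 := by
    rw [List.length_map, PySem.List.length_pyRange_one]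
    omega
  have hidx : ((PySem.List.pyRange 0 (j + 1) 1).map (bitOf done)).length - 1 = j.toNat := by
    omega
  have hget : ((PySem.List.pyRange 0 (j + 1) 1).map (bitOf done)).getD j.toNat 0 = bitOf done j := by
    have hb : j.toNat < ((PySem.List.pyRange 0 (j + 1) 1).map (bitOf done)).length := by omega
    rw [List.getD_eq_getElem _ _ hb, List.getElem_map, PySem.List.getElem_pyRange_one]
    congr 1
    omega
  rw [hidx, hget]
  unfold mkBlocks
  rw [hMr]
  apply List.ext_getElem
  · rw [List.length_set, hlen, List.length_map, PySem.List.length_pyRange_one]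
    omega
  intro k h1 h2
  have h1' : k < j.toNat + 1 := by rw [List.length_set, hlen] at h1; omega
  simp only [List.getElem_set, List.getElem_map, PySem.List.getElem_pyRange_one]
  rw [bitOf_append_singleton done n (0 + (k : Int))]
  by_cases hk : j.toNat = k
  · rw [if_pos hk]
    have hjk : j = 0 + (k : Int) := by omega
    rw [show natStep (0 + (k : Int)) (done.foldl (natStep (0 + (k : Int))) 0) n
          = done.foldl (natStep (0 + (k : Int))) 0 ||| 1 <<< (PySem.Int.mod n 32).toNat from by
        unfold natStep; rw [if_pos (by omega)]]
    rw [hjk]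
    unfold bitOf
    rw [bor_shift]
  · rw [if_neg hk]
    rw [show natStep (0 + (k : Int)) (done.foldl (natStep (0 + (k : Int))) 0) n
          = done.foldl (natStep (0 + (k : Int))) 0 from by
        unfold natStep; rw [if_neg (by omega)]]
    rfl

-- the whole scan over a sorted list of non-negative numbers
lemma foldl_stepB (s : List Int) (done : List Int)
    (hnn : ∀ x ∈ s, 0 ≤ x) (hsort : s.Pairwise (· ≤ ·))
    (hld : ∀ x ∈ done, ∀ y ∈ s, x ≤ y) :
    s.foldl stepB (mkBlocks done) = mkBlocks (done ++ s) := by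
  induction s generalizing done with
  | nil => simp
  | cons n t ih =>
    simp only [List.foldl_cons]
    rw [stepB_mkBlocks done n (hnn n (by simp)) (fun x hx => hld x hx n (by simp))]
    rw [show done ++ n :: t = (done ++ [n]) ++ t by simp]
    apply ih
    · intro x hx; exact hnn x (by simp [hx])
    · exact (List.pairwise_cons.mp hsort).2
    · intro x hx y hy
      rcases List.mem_append.mp hx with h | h
      · exact hld x h y (by simp [hy])
      · rw [List.mem_singleton.mp h]
        exact (List.pairwise_cons.mp hsort).1 y hy

-- first-extremal max? values agree on lists with the same members (used for A's max over keys)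
lemma max_congr (l1 l2 : List Int) (hm : ∀ x, x ∈ l1 ↔ x ∈ l2) :
    PySem.List.max? l1 (fun x => x) = PySem.List.max? l2 (fun x => x) := by
  rcases h1 : PySem.List.max? l1 (fun x => x) with _ | m1
  · rcases h2 : PySem.List.max? l2 (fun x => x) with _ | m2
    · rfl
    · exfalso
      have := PySem.List.max?_mem h2
      rw [PySem.List.max?_eq_none_iff] at h1
      subst h1; exact absurd ((hm m2).mpr this) (List.not_mem_nil)
  · rcases h2 : PySem.List.max? l2 (fun x => x) with _ | m2
    · exfalso
      have := PySem.List.max?_mem h1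
      rw [PySem.List.max?_eq_none_iff] at h2
      subst h2; exact absurd ((hm m1).mp this) (List.not_mem_nil)
    · have a1 := PySem.List.max?_isMax h1
      have a2 := PySem.List.max?_isMax h2
      have : m1 = m2 := le_antisymm (a2 m1 ((hm m1).mp (PySem.List.max?_mem h1)))
        (a1 m2 ((hm m2).mpr (PySem.List.max?_mem h2)))
      rw [this]

lemma ports_agree (numbers : List Int) :
    numbers_to_bitmaps numbers = numbers_to_bitmaps_alt numbers := by
  by_cases hnil : numbers = []
  · subst hnil; rfl
  · simp only [numbers_to_bitmaps, numbers_to_bitmaps_alt, if_neg hnil]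
    -- A's max over dict keys is max over the mapped block indices
    have hkeys : ∀ x, x ∈ (numbers.foldl stepA PySem.Dict.empty).keys ↔
        x ∈ numbers.map (fun n => PySem.Int.floordiv n 32) := by
      intro x
      have hstep : stepA = (fun (d : PySem.Dict Int Int) (x : Int) =>
          d.modify (PySem.Int.floordiv x 32) 0
            (fun v => PySem.Int.bor v ((1 : Int) <<< (PySem.Int.mod x 32).toNat))) := rfl
      rw [hstep, PySem.Dict.keys_foldl_modify_key]
      simp [PySem.Set.mem_update, PySem.Dict.keys_empty]
    rcases hmax : PySem.List.max? (numbers.map (fun n => PySem.Int.floordiv n 32)) (fun x => x)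
      with _ | m
    · rw [PySem.List.max?_eq_none_iff, List.map_eq_nil_iff] at hmax
      exact absurd hmax hnil
    have hmaxA : PySem.List.max? (numbers.foldl stepA PySem.Dict.empty).keys (fun x => x)
        = some m := by rw [max_congr _ _ hkeys, hmax]
    rw [hmaxA]
    simp only [Option.getD_some]
    rw [PySem.List.foldl_append_singleton_eq_map, List.nil_append]
    set s := numbers.filter (fun x => decide (0 ≤ x)) with hs
    by_cases hsnil : s = []
    · -- every input is negative: A's range is empty, B's sorted list is empty
      have hneg : ∀ x ∈ numbers, x < 0 := by
        intro x hx
        by_contra hc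
        have : x ∈ s := by
          rw [hs, List.mem_filter]
          exact ⟨hx, by simp; omega⟩
        rw [hsnil] at this
        exact absurd this (List.not_mem_nil)
      have hm : m < 0 := by
        rcases List.mem_map.mp (PySem.List.max?_mem hmax) with ⟨x, hx, hfx⟩
        rw [← hfx]
        exact fdiv_neg (hneg x hx)
      have hr : PySem.List.pyRange 0 (m + 1) 1 = [] := by
        apply List.eq_nil_of_length_eq_zero
        rw [PySem.List.length_pyRange_one]
        omega
      rw [hr, (PySem.List.sorted_eq_nil_iff s (fun x => x) false).mpr hsnil]
      simp
    · -- some non-negative input exists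
      set t := PySem.List.sorted s (fun x => x) false with ht
      have hperm : t.Perm s := PySem.List.sorted_perm s (fun x => x) false
      have hsnn : ∀ x ∈ s, 0 ≤ x := by
        intro x hx
        have := (List.mem_filter.mp (hs ▸ hx)).2
        simpa using this
      have htnn : ∀ x ∈ t, 0 ≤ x := fun x hx => hsnn x (hperm.mem_iff.mp hx)
      have hfold : t.foldl stepB [] = mkBlocks t := by
        have h0 : ([] : List Int) = mkBlocks [] := rfl
        rw [h0, foldl_stepB t [] htnn
          (by simpa using PySem.List.sorted_pairwise s (fun x => x)) (by simp), List.nil_append]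
      have hmk : mkBlocks t = mkBlocks s := by
        unfold mkBlocks
        rw [maxIdx_perm hperm]
        apply List.map_congr_left
        intro i _
        unfold bitOf
        rw [natFold_perm hperm]
      -- maxIdx s is positive and equals A's m
      obtain ⟨x0, hx0⟩ := List.exists_mem_of_ne_nil s hsnil
      have hms0 : 0 ≤ maxIdx s := by
        have h1 := (maxIdx_bounds s).2 x0 hx0
        have h2 := fdiv_nonneg (hsnn x0 hx0)
        omega
      have hmeq : m = maxIdx s := by
        have hle1 : maxIdx s ≤ m := by
          rcases maxIdx_mem s with h | h
          · omega
          · rcases List.mem_map.mp h with ⟨x, hx, hfx⟩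
            refine hfx ▸ PySem.List.max?_isMax hmax _ ?_
            exact List.mem_map_of_mem ((List.mem_filter.mp (hs ▸ hx)).1)
        have hle2 : m ≤ maxIdx s := by
          rcases List.mem_map.mp (PySem.List.max?_mem hmax) with ⟨x, hx, hfx⟩
          have hxnn : 0 ≤ x := by
            by_contra hc
            have := fdiv_neg (x := x) (by omega)
            omega
          refine hfx ▸ (maxIdx_bounds s).2 x ?_
          rw [hs, List.mem_filter]
          exact ⟨hx, by simp; omega⟩
        omega
      have hblocks : t.foldl stepB [] = mkBlocks s := by rw [hfold, hmk]
      have hAeq : (PySem.List.pyRange 0 (m + 1) 1).map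
          (fun i => (numbers.foldl stepA PySem.Dict.empty).getD i 0) = mkBlocks s := by
        rw [hmeq]
        unfold mkBlocks
        apply List.map_congr_left
        intro i hi
        have hi0 : 0 ≤ i := (PySem.List.mem_pyRange_one.mp hi).1
        rw [dictA_getD numbers PySem.Dict.empty i 0 (by simp [PySem.Dict.getD_empty])]
        unfold bitOf
        rw [natFold_filter numbers i 0 hi0, ← hs]
      have hne : t.foldl stepB [] ≠ [] := by
        rw [hblocks]
        intro hc
        have := length_mkBlocks s
        rw [hc] at this
        simp at this
        omega
      rw [if_neg hne, hAeq, hblocks]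

-- ===== VERDICT (by name: the statement is the Claim_ definition above) =====
theorem numbers_to_bitmaps_spec : Claim_equal_numbers_to_bitmaps := by
  intro numbers _
  unfold Spec_numbers_to_bitmaps
  exact ports_agree numbers
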